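-- pv_equiv track=rewrite | github.com/jurlaub/StarsCoreEngine | StarsCoreEngine/starscoreengine/battle.py | extractCoords
-- ===== SOURCE A (Python) =====
-- def extractCoords(grid, numPlayers):
--     """Extracts player starting positions from the grid diagram supplied, returns a list of tuples
--     containing the (x, y) coords (top left = (0, 0))"""
--     results = []
--     codes = "123456789ABCDEF" #what the players are in the grid
--     for c in codes[:numPlayers]:
--         for yidx, y in enumerate(grid):
--             for xidx, x in enumerate(y):
--                 if x == c:
--                     results.append((xidx, yidx))
--                     break
--     return results
-- ===== SOURCE B (Python) =====
-- def extractCoords(grid, numPlayers):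
--     """Single pass over the grid: record each row's first occurrence of every
--     player code in a per-row dict, then emit coords in code-major order."""
--     codes = "123456789ABCDEF"[:numPlayers]
--     codeset = set(codes)
--     rowfirst = []
--     for y in grid:
--         d = {}
--         for xidx, x in enumerate(y):
--             if x in codeset and x not in d:
--                 d[x] = xidx
--         rowfirst.append(d)
--     return [(d[c], yidx) for c in codes for yidx, d in enumerate(rowfirst) if c in d]
-- ===== Notes on version B (the rewrite author's own statement) =====
-- stated objective: faster
-- what changed: B makes a single pass over the grid building a per-row first-occurrence dict for the player codes, then emits coordinates code-major, instead of A's one full grid scan per player code.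
import Mathlib
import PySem

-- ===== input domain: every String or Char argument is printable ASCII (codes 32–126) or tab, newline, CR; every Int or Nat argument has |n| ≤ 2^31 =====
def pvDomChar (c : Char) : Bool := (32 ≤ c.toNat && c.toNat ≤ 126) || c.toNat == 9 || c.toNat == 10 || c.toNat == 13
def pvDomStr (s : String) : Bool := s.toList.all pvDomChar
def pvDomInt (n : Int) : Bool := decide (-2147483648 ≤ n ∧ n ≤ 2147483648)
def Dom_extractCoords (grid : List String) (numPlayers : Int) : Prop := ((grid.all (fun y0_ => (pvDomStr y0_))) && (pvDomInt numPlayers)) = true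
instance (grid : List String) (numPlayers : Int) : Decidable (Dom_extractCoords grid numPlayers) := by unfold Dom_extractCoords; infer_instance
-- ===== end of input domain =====

-- B replaces A's per-code repeated full-grid scans with one pass over the grid
-- (per-row first-occurrence dicts) followed by a code-major read-out: simpler traversal, fewer scans.


-- ===== PORT A =====
-- inner 'for xidx, x in enumerate(y): if x == c: results.append(...); break'
def rowScanA (c : Char) (yidx : Int) : List (Int × Char) → List (Int × Int) → List (Int × Int)
  | [], res => res
  | (xidx, x) :: rest, res =>
      if x = c then res ++ [(xidx, yidx)] else rowScanA c yidx rest res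

def extractCoords (grid : List String) (numPlayers : Int) : List (Int × Int) :=
  let codes := PySem.List.slice ("123456789ABCDEF".toList) none (some numPlayers)
  codes.foldl
    (fun results c =>
      (PySem.List.enumerate grid).foldl
        (fun res p => rowScanA c p.1 (PySem.List.enumerate p.2.toList) res) results)
    []

-- ===== PORT B =====
def extractCoords_alt (grid : List String) (numPlayers : Int) : List (Int × Int) :=
  let codes := PySem.List.slice ("123456789ABCDEF".toList) none (some numPlayers)
  let codeset : PySem.Set Char := PySem.Set.ofList codes
  let rowfirst : List (PySem.Dict Char Int) :=
    grid.foldl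
      (fun acc y =>
        acc ++ [(PySem.List.enumerate y.toList).foldl
          (fun d p =>
            if codeset.contains p.2 && !(PySem.Dict.contains d p.2)
            then d.insert p.2 p.1 else d)
          PySem.Dict.empty])
      []
  codes.flatMap (fun c =>
    (PySem.List.enumerate rowfirst).filterMap
      (fun q => (PySem.Dict.get? q.2 c).map (fun x => (x, q.1))))

-- ===== PRECONDITION & SPEC =====
def Spec_extractCoords (grid : List String) (numPlayers : Int) (out : List (Int × Int)) : Prop := out = extractCoords_alt grid numPlayers
instance (grid : List String) (numPlayers : Int) (out : List (Int × Int)) : Decidable (Spec_extractCoords grid numPlayers out) := by unfold Spec_extractCoords; infer_instance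

-- ===== CLAIM (what is proved, stated in full; the proofs are below) =====
def Claim_equal_extractCoords : Prop := ∀ (grid : List String) (numPlayers : Int), Dom_extractCoords grid numPlayers → Spec_extractCoords grid numPlayers (extractCoords grid numPlayers)

-- ===== LEMMAS AND PROOFS =====

-- first index paired with c in an enumerated row (what A's break-loop finds)
def firstIdx (c : Char) : List (Int × Char) → Option Int
  | [] => none
  | (i, x) :: rest => if x = c then some i else firstIdx c rest

-- all (x, y) coordinates code c produces, row-major
def hits (c : Char) (rows : List (Int × String)) : List (Int × Int) :=
  rows.filterMap (fun p => (firstIdx c (PySem.List.enumerate p.2.toList)).map (fun x => (x, p.1)))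

theorem rowScanA_eq (c : Char) (yidx : Int) (pairs : List (Int × Char)) (res : List (Int × Int)) :
    rowScanA c yidx pairs res =
      res ++ ((firstIdx c pairs).map (fun x => (x, yidx))).toList := by
  induction pairs generalizing res with
  | nil => simp [rowScanA, firstIdx]
  | cons p rest ih =>
    obtain ⟨i, x⟩ := p
    by_cases h : x = c <;> simp [rowScanA, firstIdx, h, ih]

theorem foldl_rowScanA_eq (c : Char) (rows : List (Int × String)) (res : List (Int × Int)) :
    rows.foldl (fun res p => rowScanA c p.1 (PySem.List.enumerate p.2.toList) res) res =
      res ++ hits c rows := by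
  induction rows generalizing res with
  | nil => simp [hits]
  | cons p rest ih =>
    rw [List.foldl_cons, rowScanA_eq, ih]
    unfold hits
    rw [List.filterMap_cons]
    cases firstIdx c (PySem.List.enumerate p.2.toList) <;> simp

theorem extractCoords_eq_flatMap_hits (grid : List String) (numPlayers : Int) :
    extractCoords grid numPlayers =
      (PySem.List.slice ("123456789ABCDEF".toList) none (some numPlayers)).flatMap
        (fun c => hits c (PySem.List.enumerate grid)) := by
  unfold extractCoords
  simp only [foldl_rowScanA_eq]
  exact PySem.List.foldl_append_eq_flatMap _ _ []

-- B's per-row scan computes exactly the first-occurrence map restricted to the code set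
theorem scanRowB_get? (codes : List Char) (pairs : List (Int × Char))
    (d : PySem.Dict Char Int) (c : Char) :
    PySem.Dict.get?
      (pairs.foldl
        (fun d p =>
          if (PySem.Set.ofList codes).contains p.2 && !(PySem.Dict.contains d p.2)
          then d.insert p.2 p.1 else d) d) c =
      match PySem.Dict.get? d c with
      | some v => some v
      | none => if c ∈ codes then firstIdx c pairs else none := by
  induction pairs generalizing d with
  | nil => cases h : PySem.Dict.get? d c <;> simp [firstIdx, h]
  | cons p rest ih =>
    obtain ⟨i, x⟩ := p
    rw [List.foldl_cons]
    by_cases hx : ((PySem.Set.ofList codes).contains x && !(PySem.Dict.contains d x)) = true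
    · rw [if_pos hx, ih]
      obtain ⟨hxmem, hdx⟩ : x ∈ codes ∧ PySem.Dict.get? d x = none := by
        simp only [Bool.and_eq_true, PySem.Set.contains, List.contains_iff_mem,
          PySem.Set.mem_ofList, Bool.not_eq_true',
          PySem.Dict.contains_eq_isSome_get?, Option.isSome_eq_false_iff,
          Option.isNone_iff_eq_none] at hx
        exact hx
      by_cases hc : c = x
      · subst hc
        simp [PySem.Dict.get?_insert_self, hdx, hxmem, firstIdx]
      · rw [PySem.Dict.get?_insert_of_ne _ _ hc]
        have hxc : x ≠ c := fun h => hc h.symm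
        cases hdc : PySem.Dict.get? d c <;> simp [firstIdx, hxc]
    · rw [if_neg hx, ih]
      cases hdc : PySem.Dict.get? d c
      · by_cases hcm : c ∈ codes
        · have hxc : x ≠ c := by
            intro h; subst h
            apply hx
            simp [PySem.Set.contains, PySem.Set.mem_ofList, hcm,
              PySem.Dict.contains_eq_isSome_get?, hdc]
          simp [firstIdx, hxc, hcm]
        · simp [hcm]
      · rfl

theorem enumerate_map {α β : Type} (f : α → β) (l : List α) (s : Int) :
    PySem.List.enumerate (l.map f) s =
      (PySem.List.enumerate l s).map (fun p => (p.1, f p.2)) := by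
  induction l generalizing s with
  | nil => simp [PySem.List.enumerate_nil]
  | cons a t ih => simp [PySem.List.enumerate_cons, ih]

theorem flatMap_congr_mem {α β : Type} {l : List α} {f g : α → List β}
    (h : ∀ a ∈ l, f a = g a) : l.flatMap f = l.flatMap g := by
  induction l with
  | nil => rfl
  | cons a t ih =>
    rw [List.flatMap_cons, List.flatMap_cons, h a (by simp),
      ih (fun b hb => h b (List.mem_cons_of_mem _ hb))]

-- ===== VERDICT (by name: the statement is the Claim_ definition above) =====
theorem extractCoords_spec : Claim_equal_extractCoords := by
  intro grid numPlayers _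
  unfold Spec_extractCoords
  rw [extractCoords_eq_flatMap_hits]
  unfold extractCoords_alt
  simp only [PySem.List.foldl_append_singleton_eq_map, List.nil_append, enumerate_map,
    List.filterMap_map]
  apply flatMap_congr_mem
  intro c hc
  unfold hits
  congr 1
  funext p
  simp only [Function.comp]
  rw [scanRowB_get?]
  simp only [PySem.Dict.get?_empty]
  rw [if_pos hc]
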